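-- pv_equiv track=rewrite | github.com/koychevo/python_HackBulgaria | Programming0-1/week6/forecast.py | forecast
-- ===== SOURCE A (Python) =====
-- def forecast(days):
--     sunshine_count = 0
--     rain_count = 0
--     snow_count = 0
--
--     for day in days:
--         if day == "sunshine":
--             sunshine_count += 1
--         elif day == "rain":
--             rain_count += 1
--         elif day == "snow":
--             snow_count += 1
--     if (rain_count > sunshine_count and rain_count > snow_count) or (rain_count < snow_count and snow_count == sunshine_count):
--         return "rain"
--     elif (sunshine_count > rain_count and sunshine_count > snow_count) or (sunshine_count < rain_count and rain_count == snow_count):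
--         return "sunshine"
--     elif (snow_count > sunshine_count and snow_count > rain_count) or (snow_count < rain_count and rain_count == sunshine_count):
--         return "snow"
--     elif sunshine_count == rain_count and rain_count == snow_count:
--         return days[len(days) - 1]
-- ===== SOURCE B (Python) =====
-- def forecast(days):
--     ranked = sorted(((days.count(k), k) for k in ("sunshine", "rain", "snow")),
--                     key=lambda p: p[0])
--     (c1, k1), (c2, _), (c3, k3) = ranked
--     if c2 < c3:
--         return k3                 # unique maximum count
--     if c1 < c2:
--         return k1                 # two-way tie for the maximum: the losing category
--     return days[len(days) - 1]    # all counts equal: the last day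
-- ===== Notes on version B (the rewrite author's own statement) =====
-- stated objective: alternative
-- what changed: Replaces A's single counting loop plus six-condition pairwise comparison cascade by ranking the three (count, category) pairs with a sort and reading the answer off the sorted triple: unique top -> its key, two-way tie at the top -> the bottom key, all equal -> the last day.
import Mathlib
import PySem

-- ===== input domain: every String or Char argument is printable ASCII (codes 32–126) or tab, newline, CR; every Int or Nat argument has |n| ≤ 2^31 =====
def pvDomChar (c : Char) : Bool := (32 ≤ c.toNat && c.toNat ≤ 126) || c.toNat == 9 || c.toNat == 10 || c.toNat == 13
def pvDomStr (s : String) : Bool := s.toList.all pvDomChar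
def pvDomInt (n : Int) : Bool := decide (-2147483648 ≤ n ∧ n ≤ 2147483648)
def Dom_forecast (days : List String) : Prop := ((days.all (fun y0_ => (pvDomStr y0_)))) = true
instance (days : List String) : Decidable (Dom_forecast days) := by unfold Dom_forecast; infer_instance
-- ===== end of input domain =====

-- B ranks the three (count, key) pairs with a sort and decides from the sorted triple, replacing A's six-condition cascade (objective: alternative).


-- ===== PORT A =====
def forecast (days : List String) : Option String :=
  let c : Int × Int × Int := days.foldl (fun st day =>
      if day == "sunshine" then (st.1 + 1, st.2.1, st.2.2)
      else if day == "rain" then (st.1, st.2.1 + 1, st.2.2)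
      else if day == "snow" then (st.1, st.2.1, st.2.2 + 1)
      else st) ((0 : Int), (0 : Int), (0 : Int))
  let s := c.1
  let r := c.2.1
  let n := c.2.2
  if (r > s ∧ r > n) ∨ (r < n ∧ n = s) then some "rain"
  else if (s > r ∧ s > n) ∨ (s < r ∧ r = n) then some "sunshine"
  else if (n > s ∧ n > r) ∨ (n < r ∧ r = s) then some "snow"
  else if s = r ∧ r = n then PySem.List.pyGet? days ((days.length : Int) - 1)
  else none

-- ===== PORT B =====
def forecast_alt (days : List String) : Option String :=
  let ranked := PySem.List.sorted
    (["sunshine", "rain", "snow"].map (fun k => ((PySem.List.count days k : Int), k)))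
    (fun p => p.1)
  match ranked with
  | [(c1, k1), (c2, _), (c3, k3)] =>
      if c2 < c3 then some k3
      else if c1 < c2 then some k1
      else PySem.List.pyGet? days ((days.length : Int) - 1)
  | _ => none   -- unreachable: sorting a 3-element list yields 3 elements

-- ===== PRECONDITION & SPEC =====
-- Pre_ excludes only the empty list, on which A raises IndexError (days[len(days)-1]); B raises there too.
def Pre_forecast (days : List String) : Prop := days ≠ []
instance (days : List String) : Decidable (Pre_forecast days) := by unfold Pre_forecast; infer_instance
def pvWitness_forecast : List String := ["rain", "snow", "rain"]

def Spec_forecast (days : List String) (out : Option String) : Prop := out = forecast_alt days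
instance (days : List String) (out : Option String) : Decidable (Spec_forecast days out) := by unfold Spec_forecast; infer_instance

-- ===== CLAIM (what is proved, stated in full; the proofs are below) =====
def Claim_equal_forecast : Prop := ∀ (days : List String), Dom_forecast days → Pre_forecast days → Spec_forecast days (forecast days)

-- ===== LEMMAS AND PROOFS =====

theorem fold_count_triple (days : List String) (a b c : Int) :
    days.foldl (fun st day =>
      if day == "sunshine" then (st.1 + 1, st.2.1, st.2.2)
      else if day == "rain" then (st.1, st.2.1 + 1, st.2.2)
      else if day == "snow" then (st.1, st.2.1, st.2.2 + 1)
      else st) ((a : Int), (b : Int), (c : Int))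
    = (a + (PySem.List.count days "sunshine" : Int),
       b + (PySem.List.count days "rain" : Int),
       c + (PySem.List.count days "snow" : Int)) := by
  induction days generalizing a b c with
  | nil => simp [PySem.List.count]
  | cons d t ih =>
    simp only [List.foldl_cons]
    by_cases h1 : d = "sunshine" <;> by_cases h2 : d = "rain" <;> by_cases h3 : d = "snow" <;>
      simp_all [PySem.List.count_eq] <;> ring

set_option maxHeartbeats 1000000 in
theorem decision_eq (days : List String) (s r n : Int) :
    (if (r > s ∧ r > n) ∨ (r < n ∧ n = s) then some "rain"
     else if (s > r ∧ s > n) ∨ (s < r ∧ r = n) then some "sunshine"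
     else if (n > s ∧ n > r) ∨ (n < r ∧ r = s) then some "snow"
     else if s = r ∧ r = n then PySem.List.pyGet? days ((days.length : Int) - 1)
     else none)
    =
    (match PySem.List.sorted [((s : Int), "sunshine"), (r, "rain"), (n, "snow")]
        (fun p : Int × String => p.1) with
     | [(c1, k1), (c2, _), (c3, k3)] =>
        if c2 < c3 then some k3
        else if c1 < c2 then some k1
        else PySem.List.pyGet? days ((days.length : Int) - 1)
     | _ => none) := by
  simp only [PySem.List.sorted, PySem.List.insertBy, List.foldl_cons, List.foldl_nil]
  split_ifs <;>
    simp only [PySem.List.insertBy] <;>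
    split_ifs <;>
    simp only [decide_eq_true_eq] at * <;>
    split_ifs <;> first | rfl | omega

-- ===== VERDICT (by name: the statement is the Claim_ definition above) =====
theorem forecast_spec : Claim_equal_forecast := by
  intro days _ _
  unfold Spec_forecast forecast forecast_alt
  simp only [fold_count_triple, zero_add, List.map_cons, List.map_nil]
  exact decision_eq days _ _ _
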